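-- pv_equiv track=rewrite | github.com/TheGigaChat/Python-challenges | EXAM/exam00/exam.py | get_names_from_results
-- ===== SOURCE A (Python) =====
-- def get_names_from_results(results_string: str, min_result: int) -> list:
--     """
--     Given a string of names and scores, return a list of names where the score is higher than or equal to min_result.
--
--     #3
--
--     Results are separated by comma (,). Result contains a score and optionally a name.
--     Score is integer, name can have several names separated by single space.
--     Name part can also contain numbers and other symbols (except for comma).
--     Return only the names which have the score higher or equal than min_result.
--     The order of the result should be the same as in input string.
--
--     get_names_from_results("ago 123,peeter 11", 0) => ["ago", "peeter"]
--     get_names_from_results("ago 123,peeter 11,33", 10) => ["ago", "peeter"]  # 33 does not have the name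
--     get_names_from_results("ago 123,peeter 11", 100) => ["ago"]
--     get_names_from_results("ago 123,peeter 11,kitty11!! 33", 11) => ["ago", "peeter", "kitty11!!"]
--     get_names_from_results("ago 123,peeter 11,kusti riin 14", 12) => ["ago", "kusti riin"]
--     """
--     final_list = []
--
--     def toggle_name_score(name_or_score) -> str:
--         """Toggle name and score."""
--         if name_or_score == "name":
--             return "score"
--         else:
--             return "name"
--
--     input_data_split = results_string.split(",")
--     for person in input_data_split:
--         person_reversed = person[::-1].strip()
--         score_reversed = ""
--         name_reversed = ""
--         current_toggle = "score"
--         for symbol in person_reversed: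
--             if current_toggle == "score":
--                 if symbol != " ":
--                     score_reversed += symbol
--                 else:
--                     current_toggle = toggle_name_score(current_toggle)
--             else:
--                 name_reversed += symbol
--         if score_reversed and int(score_reversed[::-1]) >= min_result and name_reversed:
--             name = name_reversed[::-1]
--             final_list.append(name)
--
--     return final_list
-- ===== SOURCE B (Python) =====
-- def get_names_from_results(results_string: str, min_result: int) -> list:
--     final_list = []
--     for person in results_string.split(","):
--         person = person.strip()
--         if not person:
--             continue
--         name, _, score = person.rpartition(" ")
--         if int(score) >= min_result and name:
--             final_list.append(name)
--     return final_list
-- ===== Notes on version B (the rewrite author's own statement) =====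
-- stated objective: idiomatic
-- what changed: B replaces A's reverse-the-string character state machine (toggle between score and name states over person[::-1]) with the structural decomposition strip + rpartition(" ") + filter, with no reversals and no per-character loop.
import Mathlib
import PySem

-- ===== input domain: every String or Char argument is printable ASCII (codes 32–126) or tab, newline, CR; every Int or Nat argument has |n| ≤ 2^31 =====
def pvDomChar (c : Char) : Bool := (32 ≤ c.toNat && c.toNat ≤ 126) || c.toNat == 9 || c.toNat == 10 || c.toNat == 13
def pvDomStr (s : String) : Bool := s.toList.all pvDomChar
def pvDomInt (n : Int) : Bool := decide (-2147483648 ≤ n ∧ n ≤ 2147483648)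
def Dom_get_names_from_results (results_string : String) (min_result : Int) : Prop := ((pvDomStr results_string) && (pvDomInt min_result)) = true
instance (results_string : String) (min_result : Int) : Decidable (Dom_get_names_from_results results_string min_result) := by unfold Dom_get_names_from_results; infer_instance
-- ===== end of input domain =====

-- B replaces A's reverse-the-string character state machine by strip + rpartition(" ") + filter
-- (idiomatic decomposition); equivalence is claimed on Pre_, the inputs where A's int() does not raise.

-- ===== PORT A =====
def toggle_name_score (name_or_score : String) : String :=
  if name_or_score == "name" then "score" else "name"

-- the inner character loop's step: state = (score_reversed, name_reversed, current_toggle)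
def pvSymStepA (st : List Char × List Char × String) (symbol : Char) :
    List Char × List Char × String :=
  if st.2.2 == "score" then
    if symbol ≠ ' ' then (st.1 ++ [symbol], st.2.1, st.2.2)
    else (st.1, st.2.1, toggle_name_score st.2.2)
  else (st.1, st.2.1 ++ [symbol], st.2.2)

-- one iteration of A's outer loop; `none` = the int() call raised ValueError
-- (slice? with step -1 is never none; .getD [] only makes it total)
def pvStepA (min_result : Int) (acc : Option (List String)) (person : List Char) :
    Option (List String) :=
  acc.bind (fun final_list =>
    let person_reversed :=
      PySem.Chars.strip ((PySem.List.slice? person none none (-1)).getD [])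
    let st := person_reversed.foldl pvSymStepA ([], [], "score")
    if st.1 ≠ [] then
      match PySem.Int.ofChars? ((PySem.List.slice? st.1 none none (-1)).getD []) with
      | none => none
      | some n =>
        if n ≥ min_result ∧ st.2.1 ≠ [] then
          some (final_list ++ [String.ofList ((PySem.List.slice? st.2.1 none none (-1)).getD [])])
        else some final_list
    else some final_list)

def get_names_from_results (results_string : String) (min_result : Int) : List String :=
  ((PySem.Chars.splitOn results_string.toList [',']).foldl (pvStepA min_result) (some [])).getD []

-- ===== PORT B =====
-- hand port of str.rpartition(" ") for the single-space separator, returning (head, tail)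
-- and dropping the separator component: exact — the last space splits the string
def rpartitionSpace (cs : List Char) : List Char × List Char :=
  let p := cs.reverse.span (fun c => c ≠ ' ')
  (p.2.tail.reverse, p.1.reverse)

-- one iteration of B's loop (on a parse failure Python raises; outside Pre_ the port skips)
def pvStepB (min_result : Int) (final_list : List String) (chunk : List Char) : List String :=
  let person := PySem.Chars.strip chunk
  if person = [] then final_list
  else
    let ns := rpartitionSpace person
    match PySem.Int.ofChars? ns.2 with
    | some n =>
      if n ≥ min_result ∧ ns.1 ≠ [] then final_list ++ [String.ofList ns.1] else final_list
    | none => final_list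

def get_names_from_results_alt (results_string : String) (min_result : Int) : List String :=
  (PySem.Chars.splitOn results_string.toList [',']).foldl (pvStepB min_result) []

-- ===== PRECONDITION & SPEC =====
-- Pre_ excludes exactly the inputs on which A raises ValueError: a comma chunk whose
-- stripped form is nonempty but whose last space-separated token is not int()-parseable.
def Pre_get_names_from_results (results_string : String) (min_result : Int) : Prop :=
  ∀ person ∈ PySem.Chars.splitOn results_string.toList [','],
    PySem.Chars.strip person = [] ∨
      (PySem.Int.ofChars?
        (((PySem.Chars.strip person).reverse.takeWhile (fun c => c ≠ ' ')).reverse)).isSome = true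

instance (results_string : String) (min_result : Int) :
    Decidable (Pre_get_names_from_results results_string min_result) := by
  unfold Pre_get_names_from_results; infer_instance

def pvWitness_get_names_from_results : String × Int := ("ago 123,peeter 11,33", 10)

def Spec_get_names_from_results (results_string : String) (min_result : Int) (out : List String) : Prop := out = get_names_from_results_alt results_string min_result
instance (results_string : String) (min_result : Int) (out : List String) : Decidable (Spec_get_names_from_results results_string min_result out) := by unfold Spec_get_names_from_results; infer_instance

-- ===== CLAIM (what is proved, stated in full; the proofs are below) =====
def Claim_equal_get_names_from_results : Prop := ∀ (results_string : String) (min_result : Int), Dom_get_names_from_results results_string min_result → Pre_get_names_from_results results_string min_result → Spec_get_names_from_results results_string min_result (get_names_from_results results_string min_result)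

-- ===== LEMMAS AND PROOFS =====

-- once toggled to "name", the machine only appends to name_reversed
lemma pvSym_name (r : List Char) : ∀ sr nr : List Char,
    r.foldl pvSymStepA (sr, nr, "name") = (sr, nr ++ r, "name") := by
  induction r with
  | nil => simp
  | cons c t ih =>
    intro sr nr
    simp only [List.foldl_cons, pvSymStepA]
    simpa using ih sr (nr ++ [c])

-- in the "score" state the machine splits at the first space of the (reversed) chunk
lemma pvSym_score (r : List Char) : ∀ sr nr : List Char,
    r.foldl pvSymStepA (sr, nr, "score") =
      (sr ++ r.takeWhile (fun c => c ≠ ' '),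
       nr ++ (r.dropWhile (fun c => c ≠ ' ')).tail,
       if (r.dropWhile (fun c => c ≠ ' ')) = [] then "score" else "name") := by
  induction r with
  | nil => simp
  | cons c t ih =>
    intro sr nr
    by_cases hc : c = ' '
    · subst hc
      simp only [List.foldl_cons, pvSymStepA, toggle_name_score]
      simp [pvSym_name]
    · simp only [List.foldl_cons, pvSymStepA]
      simp only [hc, if_pos, ne_eq, not_false_iff]
      rw [List.takeWhile_cons, List.dropWhile_cons]
      simp [hc, ih]

-- left- and right-trimming commute
lemma pv_lr_strip_comm (l : List Char) :
    PySem.Chars.rstrip (PySem.Chars.lstrip l) = PySem.Chars.lstrip (PySem.Chars.rstrip l) := by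
  induction l with
  | nil => rfl
  | cons c t ih =>
    simp only [PySem.Chars.lstrip, PySem.Chars.rstrip, List.reverse_cons] at ih ⊢
    rw [List.dropWhile_cons]
    by_cases hws : PySem.Chars.isspace c
    · rw [if_pos hws, List.dropWhile_append]
      by_cases hd : List.dropWhile PySem.Chars.isspace t.reverse = []
      · have ht : List.dropWhile PySem.Chars.isspace t = [] := by
          rw [List.dropWhile_eq_nil_iff]
          intro x hx
          exact List.dropWhile_eq_nil_iff.mp hd x (by simpa using hx)
        simp [hd, ht, hws]
      · rw [if_neg (by simpa using hd)]
        simpa [List.dropWhile_cons, hws] using ih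
    · rw [if_neg hws]
      simp only [List.reverse_cons, List.dropWhile_append]
      by_cases hd : List.dropWhile PySem.Chars.isspace t.reverse = []
      · simp [hd, hws, List.dropWhile_cons]
      · simp [hd, hws, List.isEmpty_eq_false_iff.mpr hd]

-- strip commutes with reverse
lemma pv_strip_reverse (l : List Char) :
    PySem.Chars.strip l.reverse = (PySem.Chars.strip l).reverse := by
  have h1 : PySem.Chars.lstrip l.reverse = (PySem.Chars.rstrip l).reverse := by
    simp [PySem.Chars.lstrip, PySem.Chars.rstrip]
  have h2 : ∀ m : List Char, PySem.Chars.rstrip (m.reverse) = (PySem.Chars.lstrip m).reverse := by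
    intro m; simp [PySem.Chars.lstrip, PySem.Chars.rstrip]
  calc PySem.Chars.strip l.reverse
      = PySem.Chars.rstrip ((PySem.Chars.rstrip l).reverse) := by
        simp [PySem.Chars.strip, h1]
    _ = (PySem.Chars.lstrip (PySem.Chars.rstrip l)).reverse := h2 _
    _ = (PySem.Chars.strip l).reverse := by rw [← pv_lr_strip_comm]; rfl

-- the reverse of a stripped chunk starts with a non-space character
lemma pv_strip_reverse_head (l : List Char) (h : PySem.Chars.strip l ≠ []) :
    ∃ c t, (PySem.Chars.strip l).reverse = c :: t ∧ c ≠ ' ' := by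
  have hdef : (PySem.Chars.strip l).reverse
      = List.dropWhile PySem.Chars.isspace ((PySem.Chars.lstrip l).reverse) := by
    simp [PySem.Chars.strip, PySem.Chars.rstrip]
  have hne : List.dropWhile PySem.Chars.isspace ((PySem.Chars.lstrip l).reverse) ≠ [] := by
    rw [← hdef]; simpa using h
  have hc := List.head_dropWhile_not PySem.Chars.isspace hne
  refine ⟨(List.dropWhile PySem.Chars.isspace ((PySem.Chars.lstrip l).reverse)).head hne,
    (List.dropWhile PySem.Chars.isspace ((PySem.Chars.lstrip l).reverse)).tail, ?_, ?_⟩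
  · rw [hdef]; exact (List.cons_head_tail hne).symm
  · intro hceq
    rw [hceq] at hc
    exact absurd hc (by decide)

-- one chunk: A's step (on a defined chunk) equals B's step
lemma pv_step_eq (min_result : Int) (acc : List String) (c : List Char)
    (hok : PySem.Chars.strip c = [] ∨
      (PySem.Int.ofChars?
        (((PySem.Chars.strip c).reverse.takeWhile (fun x => x ≠ ' ')).reverse)).isSome = true) :
    pvStepA min_result (some acc) c = some (pvStepB min_result acc c) := by
  unfold pvStepA pvStepB
  simp only [Option.bind_some, PySem.List.slice?_none_none_neg_one, Option.getD_some]
  rw [pv_strip_reverse]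
  by_cases hp : PySem.Chars.strip c = []
  · simp [hp]
  · rw [pvSym_score]
    obtain ⟨ch, t, hrev, hch⟩ := pv_strip_reverse_head c hp
    have hsr : (PySem.Chars.strip c).reverse.takeWhile (fun x => x ≠ ' ') ≠ [] := by
      rw [hrev]; simp [hch]
    rcases hok with h | h
    · exact absurd h hp
    cases hof : PySem.Int.ofChars?
        (((PySem.Chars.strip c).reverse.takeWhile (fun x => x ≠ ' ')).reverse) with
    | none => rw [hof] at h; simp at h
    | some n =>
      simp only [List.nil_append, if_neg hp, rpartitionSpace,
        List.span_eq_takeWhile_dropWhile, hof, hsr, ne_eq, not_false_iff, if_true]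
      split_ifs with h1 h2 h2 <;>
        first
          | rfl
          | (exfalso; revert h1 h2; simp [List.reverse_eq_nil_iff])

-- the whole loop: folding A's Option-step over defined chunks is B's fold
lemma pv_fold_eq (min_result : Int) (l : List (List Char)) : ∀ acc : List String,
    (∀ c ∈ l, PySem.Chars.strip c = [] ∨
      (PySem.Int.ofChars?
        (((PySem.Chars.strip c).reverse.takeWhile (fun x => x ≠ ' ')).reverse)).isSome = true) →
    l.foldl (pvStepA min_result) (some acc) = some (l.foldl (pvStepB min_result) acc) := by
  induction l with
  | nil => intro acc _; rfl
  | cons c t ih =>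
    intro acc hok
    simp only [List.foldl_cons]
    rw [pv_step_eq min_result acc c (hok c (by simp))]
    exact ih _ (fun d hd => hok d (by simp [hd]))

-- ===== VERDICT (by name: the statement is the Claim_ definition above) =====
theorem get_names_from_results_spec : Claim_equal_get_names_from_results := by
  intro results_string min_result _ hpre
  unfold Spec_get_names_from_results get_names_from_results get_names_from_results_alt
  rw [pv_fold_eq min_result _ [] (fun c hc => hpre c hc)]
  rfl
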